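-- pv_equiv track=rewrite | github.com/chloesgit/nutriscore | Part_5/Part_5.py | compare_nutriscores
-- ===== SOURCE A (Python) =====
-- def compare_nutriscores(score1,score2):
--     res = [ {} for _ in range(5) ]
--     for i in range(len(score1)):
--         cat1 = ord(score1[i][1])-97
--         cat2 = ord(score2[i][1])-97
--         if cat2 not in res[cat1].keys():
--             res[cat1][cat2] = 1
--         else:
--             res[cat1][cat2] += 1
--     return res
-- ===== SOURCE B (Python) =====
-- def compare_nutriscores(score1, score2):
--     # Extract the (cat1, cat2) pair at every index (indexed, so a short score2 still raises).
--     pairs = [(ord(score1[i][1]) - 97, ord(score2[i][1]) - 97) for i in range(len(score1))]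
--     # Build each category slot independently: collect its column, dedup the keys in
--     # first-occurrence order, and compute each count by counting the pair in one scan.
--     res = []
--     for s in range(5):
--         col = [c2 for (c1, c2) in pairs if c1 == s]
--         keys = []
--         for c in col:
--             if c not in keys:
--                 keys.append(c)
--         res.append({c: pairs.count((s, c)) for c in keys})
--     return res
-- ===== Notes on version B (the rewrite author's own statement) =====
-- stated objective: alternative
-- what changed: A makes one pass, incrementing a per-category dict entry at every position; B never increments anything: it extracts the pair list once, then builds each of the five slots independently by filtering that slot's column, deduplicating its keys in first-occurrence order, and computing each count with a whole-list pairs.count scan.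
import Mathlib
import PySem

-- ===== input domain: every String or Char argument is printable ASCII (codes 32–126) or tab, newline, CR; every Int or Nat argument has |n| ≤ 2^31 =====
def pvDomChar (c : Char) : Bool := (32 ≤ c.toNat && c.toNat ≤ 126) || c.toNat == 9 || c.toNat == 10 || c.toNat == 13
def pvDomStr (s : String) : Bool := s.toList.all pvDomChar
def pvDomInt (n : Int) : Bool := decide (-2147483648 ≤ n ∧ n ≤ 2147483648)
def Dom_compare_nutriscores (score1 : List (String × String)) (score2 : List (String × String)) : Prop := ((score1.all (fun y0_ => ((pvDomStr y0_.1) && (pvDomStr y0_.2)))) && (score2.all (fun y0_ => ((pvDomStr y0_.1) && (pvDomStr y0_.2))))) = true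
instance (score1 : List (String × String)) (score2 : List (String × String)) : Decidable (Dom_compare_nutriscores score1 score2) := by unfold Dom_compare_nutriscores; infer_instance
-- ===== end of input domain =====

-- B builds each category slot independently (filter the column, dedup the keys, count each
-- pair with a whole-list scan) instead of A's single incrementing pass (alternative decomposition).

-- ===== PORT A =====
-- literal transliteration: res = [{}]*5; for i in range(len(score1)): lookup/assign per position
def compare_nutriscores (score1 : List (String × String)) (score2 : List (String × String)) : List (List (Int × Int)) :=
  let res0 : List (PySem.Dict Int Int) := List.replicate 5 PySem.Dict.empty
  let res := (PySem.List.pyRange 0 (score1.length : Int) 1).foldl (fun res i =>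
    let cat1 : Int := (((PySem.List.pyGetD score1 i ("", "")).2.toList.headD ' ').toNat : Int) - 97  -- ord: exact on the single-char strings Pre_ admits
    let cat2 : Int := (((PySem.List.pyGetD score2 i ("", "")).2.toList.headD ' ').toNat : Int) - 97
    let d := PySem.List.pyGetD res cat1 PySem.Dict.empty
    let d' := if cat2 ∈ d.keys then d.modify cat2 0 (· + 1) else d.insert cat2 1
    PySem.List.pySetD res cat1 d') res0
  res.map (fun d => d.items)

-- ===== PORT B =====
-- one slot of Source B's loop body: filter the column, dedup the keys (the 'c not in keys' loop
-- is PySem.Set.add, definitionally 'if c ∈ keys then keys else keys ++ [c]'), then the dict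
-- comprehension {c: pairs.count((s,c))} over the (distinct) keys
def pvSlotB (pairs : List (Int × Int)) (s : Int) : List (Int × Int) :=
  let col := (pairs.filter (fun p => p.1 = s)).map (·.2)
  let keys := col.foldl PySem.Set.add PySem.Set.empty
  keys.map (fun c => (c, (PySem.List.count pairs (s, c) : Int)))

def compare_nutriscores_alt (score1 : List (String × String)) (score2 : List (String × String)) : List (List (Int × Int)) :=
  let pairs := (PySem.List.pyRange 0 (score1.length : Int) 1).map (fun i =>
    ((((PySem.List.pyGetD score1 i ("", "")).2.toList.headD ' ').toNat : Int) - 97,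
     (((PySem.List.pyGetD score2 i ("", "")).2.toList.headD ' ').toNat : Int) - 97))
  (PySem.List.pyRange 0 5 1).map (fun s => pvSlotB pairs s)

-- ===== PRECONDITION & SPEC =====
-- Pre_ keeps the natural domain: score2 at least as long as score1, every category field a single
-- character, and score1's category letters in 'a'..'e'. It excludes the inputs where A raises
-- (short score2, non-single-char fields, letters with code < 92 or > 101) and also codes 92..96,
-- on which A still RETURNS via Python's negative-index wraparound, an artefact that merges two
-- category slots and which B's per-slot reconstruction does not reproduce (see cites).
def Pre_compare_nutriscores (score1 : List (String × String)) (score2 : List (String × String)) : Prop :=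
  score1.length ≤ score2.length ∧
  (∀ p ∈ score1, p.2.toList.length = 1 ∧ 97 ≤ (p.2.toList.headD ' ').toNat ∧ (p.2.toList.headD ' ').toNat ≤ 101) ∧
  (∀ p ∈ score2.take score1.length, p.2.toList.length = 1)
instance (score1 : List (String × String)) (score2 : List (String × String)) : Decidable (Pre_compare_nutriscores score1 score2) := by unfold Pre_compare_nutriscores; infer_instance

def pvWitness_compare_nutriscores : (List (String × String)) × (List (String × String)) :=
  ([("pasta", "a"), ("soda", "e"), ("rice", "a")], [("pasta", "b"), ("soda", "e"), ("rice", "b")])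

def Spec_compare_nutriscores (score1 : List (String × String)) (score2 : List (String × String)) (out : List (List (Int × Int))) : Prop := out = compare_nutriscores_alt score1 score2
instance (score1 : List (String × String)) (score2 : List (String × String)) (out : List (List (Int × Int))) : Decidable (Spec_compare_nutriscores score1 score2 out) := by unfold Spec_compare_nutriscores; infer_instance

-- ===== CLAIM (what is proved, stated in full; the proofs are below) =====
def Claim_equal_compare_nutriscores : Prop := ∀ (score1 : List (String × String)) (score2 : List (String × String)), Dom_compare_nutriscores score1 score2 → Pre_compare_nutriscores score1 score2 → Spec_compare_nutriscores score1 score2 (compare_nutriscores score1 score2)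

-- ===== LEMMAS AND PROOFS =====

-- the key extracted at index i (both ports compute it this way)
def pvKey (score1 score2 : List (String × String)) (i : Int) : Int × Int :=
  ((((PySem.List.pyGetD score1 i ("", "")).2.toList.headD ' ').toNat : Int) - 97,
   (((PySem.List.pyGetD score2 i ("", "")).2.toList.headD ' ').toNat : Int) - 97)

-- A's loop step, on keys
def pvStepA (res : List (PySem.Dict Int Int)) (k : Int × Int) : List (PySem.Dict Int Int) :=
  PySem.List.pySetD res k.1
    (if k.2 ∈ (PySem.List.pyGetD res k.1 PySem.Dict.empty).keys
     then (PySem.List.pyGetD res k.1 PySem.Dict.empty).modify k.2 0 (· + 1)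
     else (PySem.List.pyGetD res k.1 PySem.Dict.empty).insert k.2 1)

def pvRes0 : List (PySem.Dict Int Int) := List.replicate 5 PySem.Dict.empty

-- slot s of A's result: a counter over the second components of the keys whose first is s
def pvTarget (ks : List (Int × Int)) (s : Int) : PySem.Dict Int Int :=
  PySem.Dict.counter ((ks.filter (fun k => k.1 = s)).map (·.2))

theorem pv_if_collapse (d : PySem.Dict Int Int) (k2 : Int) :
    (if k2 ∈ d.keys then d.modify k2 0 (· + 1) else d.insert k2 1) = d.modify k2 0 (· + 1) := by
  by_cases h : k2 ∈ d.keys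
  · rw [if_pos h]
  · have hc : d.contains k2 = false := by
      rw [PySem.Dict.contains_eq_decide_mem_keys]; simp [h]
    have hm : d.modify k2 0 (· + 1) = d.insert k2 (d.getD k2 0 + 1) := rfl
    rw [if_neg h, hm, PySem.Dict.getD_of_not_contains d 0 hc]
    norm_num

theorem pv_A_char (ks : List (Int × Int)) (h : ∀ k ∈ ks, 0 ≤ k.1 ∧ k.1 < 5) :
    ks.foldl pvStepA pvRes0 = (List.range 5).map (fun (s : Nat) => pvTarget ks (s : Int)) := by
  induction ks using List.reverseRecOn with
  | nil => rfl
  | append_singleton ks k ih =>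
    have hks : ∀ x ∈ ks, 0 ≤ x.1 ∧ x.1 < 5 := fun x hx => h x (List.mem_append_left _ hx)
    have hk : 0 ≤ k.1 ∧ k.1 < 5 := h k (by simp)
    rw [List.foldl_append, ih hks]
    have hcast : ((k.1.toNat : Nat) : Int) = k.1 := Int.toNat_of_nonneg hk.1
    have htlt : k.1.toNat < 5 := by omega
    have hgetd : PySem.List.pyGetD ((List.range 5).map (fun (s : Nat) => pvTarget ks (s : Int)))
        k.1 PySem.Dict.empty = pvTarget ks k.1 := by
      rw [PySem.List.pyGetD_eq_getElem _ _ hk.1 (by simpa using hk.2)]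
      simp [hcast]
    have hmod : (pvTarget ks k.1).modify k.2 0 (· + 1) = pvTarget (ks ++ [k]) k.1 := by
      unfold pvTarget
      rw [← PySem.Dict.counter_append_singleton]
      congr 1
      rw [List.filter_append, List.map_append]
      simp
    show pvStepA _ k = _
    unfold pvStepA
    rw [hgetd, pv_if_collapse, PySem.List.pySetD_of_nonneg _ _ hk.1, hmod]
    apply List.ext_getElem
    · simp
    · intro t ht1 ht2
      simp only [List.length_set, List.length_map, List.length_range] at ht1 ht2
      by_cases hc : t = k.1.toNat
      · subst hc
        rw [List.getElem_set_self]
        simp [hcast]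
      · rw [List.getElem_set_ne (fun e => hc e.symm)]
        simp only [List.getElem_map, List.getElem_range]
        have hne : ¬ k.1 = ((t : Nat) : Int) := by omega
        unfold pvTarget
        congr 2
        rw [List.filter_append]
        simp [hne]

theorem pv_count (ks : List (Int × Int)) (s c : Int) :
    List.count c ((ks.filter (fun k => k.1 = s)).map (·.2)) = List.count (s, c) ks := by
  induction ks with
  | nil => rfl
  | cons k t ih =>
    by_cases h1 : k.1 = s
    · by_cases h2 : k.2 = c
      · have hk : (s, c) = k := by cases k; simp_all
        simp [ih, ← hk]
      · have hk : ¬ k = (s, c) := fun e => h2 (by rw [e])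
        simp [h1, List.count_cons, ih, hk]
        exact h2
    · have hk : ¬ k = (s, c) := fun e => h1 (by rw [e])
      simp [h1, ih, hk]

theorem pv_keys (ks : List (Int × Int)) (s : Int) :
    PySem.Set.ofList ((ks.filter (fun k => k.1 = s)).map (·.2))
      = ((PySem.Set.ofList ks).filter (fun k => k.1 = s)).map (·.2) := by
  induction ks using List.reverseRecOn with
  | nil => rfl
  | append_singleton t k ih =>
    rw [List.filter_append, PySem.Set.ofList_append_singleton]
    by_cases h1 : k.1 = s
    · have hfk : List.filter (fun k => decide (k.1 = s)) [k] = [k] := by simp [h1]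
      rw [hfk, List.map_append]
      simp only [List.map_cons, List.map_nil]
      rw [PySem.Set.ofList_append_singleton]
      by_cases hm : k ∈ t
      · have hk2 : k.2 ∈ PySem.Set.ofList ((t.filter (fun k => k.1 = s)).map (·.2)) := by
          rw [PySem.Set.mem_ofList]
          exact List.mem_map_of_mem (List.mem_filter.2 ⟨hm, by simp [h1]⟩)
        have hkm : k ∈ PySem.Set.ofList t := (PySem.Set.mem_ofList _ _).2 hm
        rw [PySem.Set.add_of_mem hk2, PySem.Set.add_of_mem hkm, ih]
      · have hk2 : k.2 ∉ PySem.Set.ofList ((t.filter (fun k => k.1 = s)).map (·.2)) := by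
          rw [PySem.Set.mem_ofList]
          intro hmem
          obtain ⟨x, hx, hx2⟩ := List.mem_map.1 hmem
          have hx1 : x.1 = s := by simpa using List.of_mem_filter hx
          have : x = k := Prod.ext (hx1.trans h1.symm) hx2
          exact hm (this ▸ List.mem_of_mem_filter hx)
        have hkm : k ∉ PySem.Set.ofList t := fun hx => hm ((PySem.Set.mem_ofList _ _).1 hx)
        rw [PySem.Set.add_of_not_mem hk2, PySem.Set.add_of_not_mem hkm, ih,
          List.filter_append, hfk, List.map_append]
        simp
    · have hfk : List.filter (fun k => decide (k.1 = s)) [k] = [] := by simp [h1]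
      rw [hfk, List.append_nil]
      by_cases hm : k ∈ t
      · rw [PySem.Set.add_of_mem ((PySem.Set.mem_ofList _ _).2 hm), ih]
      · rw [PySem.Set.add_of_not_mem (fun hx => hm ((PySem.Set.mem_ofList _ _).1 hx)), ih,
          List.filter_append, hfk, List.append_nil]

theorem pv_slot (ks : List (Int × Int)) (s : Int) :
    (pvTarget ks s).items
      = ((PySem.Set.ofList ks).filter (fun k => k.1 = s)).map (fun k => (k.2, (List.count k ks : Int))) := by
  unfold pvTarget
  rw [PySem.Dict.items_counter, pv_keys, List.map_map]
  apply List.map_congr_left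
  intro k hk
  have hs : k.1 = s := by simpa using List.of_mem_filter hk
  have hke : (s, k.2) = k := by cases k; simp_all
  have hcnt := pv_count ks s k.2
  rw [hke] at hcnt
  simp [Function.comp, hcnt]

-- B's slot equals the corresponding slot of A's characterisation
theorem pv_slotB_eq (ks : List (Int × Int)) (s : Int) :
    pvSlotB ks s = (pvTarget ks s).items := by
  show (PySem.Set.ofList ((ks.filter (fun p => p.1 = s)).map (·.2))).map
      (fun c => (c, (PySem.List.count ks (s, c) : Int))) = (pvTarget ks s).items
  rw [pv_keys, pv_slot, List.map_map]
  apply List.map_congr_left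
  intro k hk
  have hs : k.1 = s := by simpa using List.of_mem_filter hk
  have hke : (s, k.2) = k := by cases k; simp_all
  simp [Function.comp, PySem.List.count_eq, hke]

-- ===== VERDICT (by name: the statement is the Claim_ definition above) =====
theorem compare_nutriscores_spec : Claim_equal_compare_nutriscores := by
  intro s1 s2 _ hpre
  obtain ⟨hlen, h1, _h2⟩ := hpre
  unfold Spec_compare_nutriscores
  have hA : compare_nutriscores s1 s2
      = ((((PySem.List.pyRange 0 (s1.length : Int) 1).map (pvKey s1 s2)).foldl pvStepA pvRes0).map (fun d => d.items)) := by
    rw [List.foldl_map]; rfl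
  have hB : compare_nutriscores_alt s1 s2
      = (PySem.List.pyRange 0 5 1).map (pvSlotB ((PySem.List.pyRange 0 (s1.length : Int) 1).map (pvKey s1 s2))) := rfl
  set ks := (PySem.List.pyRange 0 (s1.length : Int) 1).map (pvKey s1 s2) with hks
  have hbound : ∀ k ∈ ks, 0 ≤ k.1 ∧ k.1 < 5 := by
    intro k hk
    rw [hks] at hk
    obtain ⟨i, hi, rfl⟩ := List.mem_map.1 hk
    have hi' : 0 ≤ i ∧ i < (s1.length : Int) := PySem.List.mem_pyRange_one.1 hi
    have hget : PySem.List.pyGetD s1 i ("", "") = s1[i.toNat]'(by omega) :=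
      PySem.List.pyGetD_eq_getElem s1 ("", "") hi'.1 hi'.2
    have hmem : s1[i.toNat]'(by omega) ∈ s1 := List.getElem_mem _
    obtain ⟨_, hlo, hhi⟩ := h1 _ hmem
    unfold pvKey
    rw [hget]
    constructor
    · omega
    · omega
  rw [hA, hB, pv_A_char ks hbound, List.map_map]
  have hr5 : PySem.List.pyRange 0 5 1 = [0, 1, 2, 3, 4] := rfl
  rw [hr5]
  simp only [pv_slotB_eq, List.map_cons, List.map_nil]
  simp [List.range_succ]
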